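-- pv_equiv track=rewrite | github.com/belozersky321/PhyloBench | consense-ncbi.py | dotsnstars
-- ===== SOURCE A (Python) =====
-- def dotsnstars(branch):
--   result = ""
--   left = branch[0]
--   right = branch[1]
--   listnames = sorted(list(left | right))
--   for name in listnames:
--     if name in left: result += '.'
--     if name in right: result += '*'
--   return result
-- ===== SOURCE B (Python) =====
-- def dotsnstars(branch):
--     la = sorted(branch[0])
--     lb = sorted(branch[1])
--     i = j = 0
--     out = []
--     while i < len(la) and j < len(lb):
--         if la[i] == lb[j]:
--             out.append('.')
--             out.append('*')
--             i += 1
--             j += 1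
--         elif la[i] < lb[j]:
--             out.append('.')
--             i += 1
--         else:
--             out.append('*')
--             j += 1
--     out.extend('.' * (len(la) - i))
--     out.extend('*' * (len(lb) - j))
--     return ''.join(out)
-- ===== Notes on version B (the rewrite author's own statement) =====
-- stated objective: alternative
-- what changed: Instead of sorting the union of the two sets and probing membership of each name in both sets, B sorts each set once and merges the two sorted lists with two cursors, emitting '.'/'*' directly; no union is built and no membership test is performed.
import Mathlib
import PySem

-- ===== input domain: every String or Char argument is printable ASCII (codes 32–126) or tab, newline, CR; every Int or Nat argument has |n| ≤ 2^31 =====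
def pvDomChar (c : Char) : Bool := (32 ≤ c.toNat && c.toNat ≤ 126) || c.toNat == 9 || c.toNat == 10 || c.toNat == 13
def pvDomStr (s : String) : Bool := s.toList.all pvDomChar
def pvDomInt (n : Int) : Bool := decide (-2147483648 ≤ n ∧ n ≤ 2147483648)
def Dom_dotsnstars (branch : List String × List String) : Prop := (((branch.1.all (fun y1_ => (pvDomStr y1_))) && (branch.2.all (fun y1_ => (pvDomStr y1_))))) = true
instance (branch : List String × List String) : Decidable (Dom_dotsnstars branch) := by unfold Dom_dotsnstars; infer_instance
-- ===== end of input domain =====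

-- B replaces A's sort-the-union-then-probe by a two-cursor merge of the two sorted sets (no membership tests).


-- ===== PORT A =====
-- branch's components are Python sets (distinct elements, Set.ofList); `left | right` is
-- PySem.Set.union.  result += '.' is accumulated on List Char and packed with String.mk at
-- the end (Lean's String.append is kernel-opaque).
def dotsnstars (branch : List String × List String) : String :=
  let left := branch.1
  let right := branch.2
  let listnames := PySem.List.sorted (PySem.Set.union (PySem.Set.ofList left) (PySem.Set.ofList right)) (fun x => x) false
  String.mk (listnames.foldl (fun result name =>
    let result := if name ∈ left then result ++ ['.'] else result
    if name ∈ right then result ++ ['*'] else result) [])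

-- ===== PORT B =====
-- Source B's while loop with cursors i, j over la, lb is this structural two-list recursion;
-- the two tail `extend`s are the base cases.
def mergeDS : List String → List String → List Char
  | [], lb => lb.map (fun _ => '*')
  | _ :: la, [] => '.' :: mergeDS la []
  | a :: la, b :: lb =>
    if a = b then '.' :: '*' :: mergeDS la lb
    else if a < b then '.' :: mergeDS la (b :: lb)
    else '*' :: mergeDS (a :: la) lb

def dotsnstars_alt (branch : List String × List String) : String :=
  let la := PySem.List.sorted (PySem.Set.ofList branch.1) (fun x => x) false
  let lb := PySem.List.sorted (PySem.Set.ofList branch.2) (fun x => x) false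
  String.mk (mergeDS la lb)

-- ===== PRECONDITION & SPEC =====
def Spec_dotsnstars (branch : List String × List String) (out : String) : Prop := out = dotsnstars_alt branch
instance (branch : List String × List String) (out : String) : Decidable (Spec_dotsnstars branch out) := by unfold Spec_dotsnstars; infer_instance

-- ===== CLAIM (what is proved, stated in full; the proofs are below) =====
def Claim_equal_dotsnstars : Prop := ∀ (branch : List String × List String), Dom_dotsnstars branch → Spec_dotsnstars branch (dotsnstars branch)

-- ===== LEMMAS AND PROOFS =====

-- the sorted merge-union of two sorted lists (proof-side mirror of mergeDS's traversal)
def munion : List String → List String → List String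
  | [], lb => lb
  | a :: la, [] => a :: munion la []
  | a :: la, b :: lb =>
    if a = b then a :: munion la lb
    else if a < b then a :: munion la (b :: lb)
    else b :: munion (a :: la) lb

theorem munion_nil_left (lb : List String) : munion [] lb = lb := by
  cases lb <;> simp [munion]

theorem munion_nil (la : List String) : munion la [] = la := by
  induction la with
  | nil => simp [munion]
  | cons a la ih => simp [munion, ih]

theorem munion_cons_cons (a b : String) (la lb : List String) :
    munion (a :: la) (b :: lb) =
      if a = b then a :: munion la lb
      else if a < b then a :: munion la (b :: lb)
      else b :: munion (a :: la) lb := by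
  simp only [munion]

theorem mergeDS_cons_cons (a b : String) (la lb : List String) :
    mergeDS (a :: la) (b :: lb) =
      if a = b then '.' :: '*' :: mergeDS la lb
      else if a < b then '.' :: mergeDS la (b :: lb)
      else '*' :: mergeDS (a :: la) lb := by
  simp only [mergeDS]

theorem mergeDS_nil_left (lb : List String) : mergeDS [] lb = lb.map (fun _ => '*') := by
  cases lb <;> simp [mergeDS]

theorem mergeDS_cons_nil (a : String) (la : List String) :
    mergeDS (a :: la) [] = '.' :: mergeDS la [] := by
  simp only [mergeDS]

theorem mem_munion (la lb : List String) (x : String) :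
    x ∈ munion la lb ↔ x ∈ la ∨ x ∈ lb := by
  induction la generalizing lb with
  | nil => simp [munion_nil_left]
  | cons a la ih =>
    induction lb with
    | nil => simp [munion_nil]
    | cons b lb ihb =>
      rw [munion_cons_cons]
      split_ifs with hab hlt
      · subst hab
        simp only [List.mem_cons, ih]
        tauto
      · simp only [List.mem_cons, ih]
        tauto
      · simp only [List.mem_cons] at ihb ⊢
        rw [ihb]
        tauto

theorem munion_pairwise (la lb : List String)
    (ha : la.Pairwise (· < ·)) (hb : lb.Pairwise (· < ·)) :
    (munion la lb).Pairwise (· < ·) := by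
  induction la generalizing lb with
  | nil => simpa [munion_nil_left] using hb
  | cons a la ih =>
    induction lb with
    | nil =>
      rw [munion_nil]; exact ha
    | cons b lb ihb =>
      rw [List.pairwise_cons] at ha hb
      rw [munion_cons_cons]
      split_ifs with hab hlt
      · subst hab
        refine List.pairwise_cons.mpr ⟨?_, ih lb ha.2 hb.2⟩
        intro n hn
        rcases (mem_munion la lb n).mp hn with h | h
        · exact ha.1 n h
        · exact hb.1 n h
      · refine List.pairwise_cons.mpr ⟨?_, ih (b :: lb) ha.2 (List.pairwise_cons.mpr hb)⟩
        intro n hn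
        rcases (mem_munion la (b :: lb) n).mp hn with h | h
        · exact ha.1 n h
        · rcases List.mem_cons.mp h with rfl | h
          · exact hlt
          · exact lt_trans hlt (hb.1 n h)
      · have hba : b < a := lt_of_le_of_ne (not_lt.mp hlt) (Ne.symm hab)
        refine List.pairwise_cons.mpr ⟨?_, ihb hb.2⟩
        intro n hn
        rcases (mem_munion (a :: la) lb n).mp hn with h | h
        · rcases List.mem_cons.mp h with rfl | h
          · exact hba
          · exact lt_trans hba (ha.1 n h)
        · exact hb.1 n h

-- the per-name marks A emits
def markDS (left right : List String) (n : String) : List Char :=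
  (if n ∈ left then ['.'] else []) ++ (if n ∈ right then ['*'] else [])

theorem foldl_marks (left right : List String) (u : List String) (acc : List Char) :
    u.foldl (fun result name =>
      let result := if name ∈ left then result ++ ['.'] else result
      if name ∈ right then result ++ ['*'] else result) acc
    = acc ++ u.flatMap (markDS left right) := by
  induction u generalizing acc with
  | nil => simp
  | cons n u ih =>
    simp only [List.foldl_cons, List.flatMap_cons, ih, markDS]
    split_ifs <;> simp

-- the merge, on strictly sorted cursors whose membership agrees with L and R,
-- emits exactly A's marks along the sorted union
theorem mergeDS_eq_flatMap (L R : List String) (la lb : List String)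
    (ha : la.Pairwise (· < ·)) (hb : lb.Pairwise (· < ·))
    (hmem : ∀ n, n ∈ la ∨ n ∈ lb → ((n ∈ L ↔ n ∈ la) ∧ (n ∈ R ↔ n ∈ lb))) :
    mergeDS la lb = (munion la lb).flatMap (markDS L R) := by
  induction la generalizing lb with
  | nil =>
    rw [munion_nil_left, mergeDS_nil_left]
    rw [List.flatMap_congr (g := fun _ => ['*'])
      (by
        intro n hn
        have h := hmem n (Or.inr hn)
        simp only [markDS, List.not_mem_nil] at h ⊢
        rw [if_neg (by simp [h.1]), if_pos (h.2.mpr hn)]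
        simp)]
    induction lb with
    | nil => rfl
    | cons b lb ihb =>
      simp_all
  | cons a la ih =>
    induction lb with
    | nil =>
      rw [munion_nil]
      rw [List.pairwise_cons] at ha
      rw [mergeDS_cons_nil]
      rw [ih [] ha.2 (by simp)
        (by
          intro n hn
          rcases hn with hn | hn
          · have h := hmem n (Or.inl (List.mem_cons_of_mem a hn))
            have hne : n ≠ a := fun e => absurd (e ▸ ha.1 n hn) (lt_irrefl a)
            constructor
            · rw [h.1]; simp [hne]
            · exact h.2
          · simp at hn)]
      have haL : a ∈ L := (hmem a (Or.inl List.mem_cons_self)).1.mpr List.mem_cons_self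
      have haR : a ∉ R := fun h => by
        have := (hmem a (Or.inl List.mem_cons_self)).2.mp h
        simp at this
      rw [munion_nil, List.flatMap_cons, markDS, if_pos haL, if_neg haR]
      rfl
    | cons b lb ihb =>
      rw [List.pairwise_cons] at ha hb
      rw [mergeDS_cons_cons, munion_cons_cons]
      split_ifs with hab hlt
      · -- a = b : emit '.' '*'
        subst hab
        have haL : a ∈ L := (hmem a (Or.inl List.mem_cons_self)).1.mpr List.mem_cons_self
        have haR : a ∈ R := (hmem a (Or.inr List.mem_cons_self)).2.mpr List.mem_cons_self
        rw [List.flatMap_cons, markDS, if_pos haL, if_pos haR]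
        rw [ih lb ha.2 hb.2
          (by
            intro n hn
            have hgt : a < n := by
              rcases hn with hn | hn
              · exact ha.1 n hn
              · exact hb.1 n hn
            have hne : n ≠ a := fun e => absurd (e ▸ hgt) (lt_irrefl a)
            have h := hmem n (Or.elim hn (fun h => Or.inl (List.mem_cons_of_mem a h))
              (fun h => Or.inr (List.mem_cons_of_mem a h)))
            constructor
            · rw [h.1]; simp [hne]
            · rw [h.2]; simp [hne])]
        rfl
      · -- a < b : emit '.'
        have haL : a ∈ L := (hmem a (Or.inl List.mem_cons_self)).1.mpr List.mem_cons_self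
        have haR : a ∉ R := fun h => by
          rcases List.mem_cons.mp ((hmem a (Or.inl List.mem_cons_self)).2.mp h) with e | hin
          · exact absurd (e ▸ hlt) (lt_irrefl b)
          · exact absurd (hb.1 a hin) (fun hba => lt_asymm hlt hba)
        rw [List.flatMap_cons, markDS, if_pos haL, if_neg haR]
        rw [ih (b :: lb) ha.2 (List.pairwise_cons.mpr hb)
          (by
            intro n hn
            have hgt : a < n := by
              rcases hn with hn | hn
              · exact ha.1 n hn
              · rcases List.mem_cons.mp hn with rfl | hn
                · exact hlt
                · exact lt_trans hlt (hb.1 n hn)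
            have hne : n ≠ a := fun e => absurd (e ▸ hgt) (lt_irrefl a)
            have h := hmem n (Or.elim hn (fun h => Or.inl (List.mem_cons_of_mem a h)) Or.inr)
            constructor
            · rw [h.1]; simp [hne]
            · exact h.2)]
        rfl
      · -- b < a : emit '*'
        have hba : b < a := lt_of_le_of_ne (not_lt.mp hlt) (Ne.symm hab)
        have hbR : b ∈ R := (hmem b (Or.inr List.mem_cons_self)).2.mpr List.mem_cons_self
        have hbL : b ∉ L := fun h => by
          rcases List.mem_cons.mp ((hmem b (Or.inr List.mem_cons_self)).1.mp h) with e | hin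
          · exact absurd (e ▸ hba) (lt_irrefl a)
          · exact absurd (ha.1 b hin) (fun hab' => lt_asymm hba hab')
        rw [List.flatMap_cons, markDS, if_neg hbL, if_pos hbR]
        rw [ihb hb.2
          (by
            intro n hn
            have hgt : b < n := by
              rcases hn with hn | hn
              · rcases List.mem_cons.mp hn with rfl | hn
                · exact hba
                · exact lt_trans hba (ha.1 n hn)
              · exact hb.1 n hn
            have hne : n ≠ b := fun e => absurd (e ▸ hgt) (lt_irrefl b)
            have h := hmem n (Or.elim hn Or.inl (fun h => Or.inr (List.mem_cons_of_mem b h)))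
            constructor
            · exact h.1
            · rw [h.2]; simp [hne])]
        rfl

-- ===== VERDICT (by name: the statement is the Claim_ definition above) =====
theorem dotsnstars_spec : Claim_equal_dotsnstars := by
  intro branch _
  unfold Spec_dotsnstars
  obtain ⟨left, right⟩ := branch
  have hpa : (PySem.List.sorted (PySem.Set.ofList left) (fun x => x) false).Pairwise (· < ·) :=
    PySem.List.sorted_ofList_pairwise_lt left
  have hpb : (PySem.List.sorted (PySem.Set.ofList right) (fun x => x) false).Pairwise (· < ·) :=
    PySem.List.sorted_ofList_pairwise_lt right
  have hmla : ∀ n, n ∈ PySem.List.sorted (PySem.Set.ofList left) (fun x => x) false ↔ n ∈ left := by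
    intro n
    rw [PySem.List.mem_sorted, PySem.Set.mem_ofList]
  have hmlb : ∀ n, n ∈ PySem.List.sorted (PySem.Set.ofList right) (fun x => x) false ↔ n ∈ right := by
    intro n
    rw [PySem.List.mem_sorted, PySem.Set.mem_ofList]
  have hu : PySem.List.sorted (PySem.Set.union (PySem.Set.ofList left) (PySem.Set.ofList right)) (fun x => x) false
      = munion (PySem.List.sorted (PySem.Set.ofList left) (fun x => x) false)
               (PySem.List.sorted (PySem.Set.ofList right) (fun x => x) false) := by
    apply PySem.List.sorted_eq_of_perm_of_pairwise_lt
    · rw [List.perm_ext_iff_of_nodup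
        ((munion_pairwise _ _ hpa hpb).imp ne_of_lt)
        (PySem.Set.nodup_union _ _ (PySem.Set.nodup_ofList left))]
      intro n
      rw [mem_munion, PySem.Set.mem_union, PySem.Set.mem_ofList, PySem.Set.mem_ofList,
        hmla, hmlb]
    · exact munion_pairwise _ _ hpa hpb
  simp only [dotsnstars, dotsnstars_alt]
  rw [hu, foldl_marks, List.nil_append]
  rw [mergeDS_eq_flatMap left right _ _ hpa hpb
    (fun n _ => ⟨(hmla n).symm, (hmlb n).symm⟩)]
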